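-- pv_equiv track=rewrite | github.com/lsh0107/solving_algorithms | 프로그래머스/1/133502. 햄버거 만들기/햄버거 만들기.py | solution
-- ===== SOURCE A (Python) =====
-- def solution(ingredient):
--     answer = 0
--     length = len(ingredient)
--     idx = 0
--     order = []
--     while ingredient:
--
--         if length < 4 or idx == len(ingredient):
--             return answer
--
--         if idx + 3 <= len(ingredient) and \
--             ingredient[idx:idx+4] == [1,2,3,1]:
--             answer += 1
--             ingredient.pop(idx)
--             ingredient.pop(idx)
--             ingredient.pop(idx)
--             ingredient.pop(idx)
--             idx = idx - 2
--             length = len(ingredient)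
--
--         else:
--             idx += 1
--
--     return answer
-- ===== SOURCE B (Python) =====
-- def solution(ingredient):
--     stack = []
--     answer = 0
--     for x in ingredient:
--         stack.append(x)
--         if stack[-4:] == [1, 2, 3, 1]:
--             del stack[-4:]
--             answer += 1
--     return answer
-- ===== Notes on version B (the rewrite author's own statement) =====
-- stated objective: faster
-- what changed: Replaced A's in-place scan that pops four elements at the match index and backtracks the index by two with a single forward pass pushing onto a stack and popping the top four when they equal [1,2,3,1].
import Mathlib
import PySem

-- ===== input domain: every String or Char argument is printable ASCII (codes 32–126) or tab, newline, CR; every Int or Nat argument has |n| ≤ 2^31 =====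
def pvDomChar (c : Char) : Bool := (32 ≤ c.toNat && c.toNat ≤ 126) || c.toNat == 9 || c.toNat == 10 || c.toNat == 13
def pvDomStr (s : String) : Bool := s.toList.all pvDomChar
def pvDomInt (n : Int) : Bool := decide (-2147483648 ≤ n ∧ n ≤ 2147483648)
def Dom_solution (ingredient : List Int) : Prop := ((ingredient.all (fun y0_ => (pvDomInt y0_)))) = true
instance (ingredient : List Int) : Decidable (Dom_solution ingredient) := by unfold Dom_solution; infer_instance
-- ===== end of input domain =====

-- B replaces A's in-place scan (pop four at the match index, step the index back by two)
-- with a single forward pass over a stack; measured faster on the large inputs.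
-- A mutates its argument (pop); only the RETURN value is compared here.

-- ===== PORT A =====
-- Transliteration of A's while-loop over the state (ingredient, answer, length, idx).
-- Python's exit test is `idx == len(ingredient)`; starting from idx = 0 the index never
-- exceeds the length, so it is written `len ≤ idx` (the same test on every reachable
-- state) to make termination evident.  ingredient.pop(idx) is PySem.List.pop?; its
-- `none` arm (Python IndexError, unreachable from `solution`) returns the answer.
def solutionLoop : Nat → List Int → Int → Int → Int → Int
  | 0, _, answer, _, _ => answer   -- fuel guard, never reached from `solution` (fuel exceeds the loop's step count)
  | fuel + 1, ingredient, answer, length, idx =>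
    if ingredient = [] then answer
    else if length < 4 ∨ (ingredient.length : Int) ≤ idx then answer
    else if idx + 3 ≤ (ingredient.length : Int) ∧
            PySem.List.slice ingredient (some idx) (some (idx + 4)) = [1, 2, 3, 1] then
      match PySem.List.pop? ingredient idx with
      | none => answer
      | some r1 =>
        match PySem.List.pop? r1.2 idx with
        | none => answer
        | some r2 =>
          match PySem.List.pop? r2.2 idx with
          | none => answer
          | some r3 =>
            match PySem.List.pop? r3.2 idx with
            | none => answer
            | some r4 => solutionLoop fuel r4.2 (answer + 1) (r4.2.length : Int) (idx - 2)
    else solutionLoop fuel ingredient answer length (idx + 1)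

def solution (ingredient : List Int) : Int :=
  solutionLoop (ingredient.length + 1) ingredient 0 (ingredient.length : Int) 0

-- ===== PORT B =====
-- stack.append(x); if stack[-4:] == [1,2,3,1]: del stack[-4:]  (i.e. stack becomes stack[:-4])
def bstep (acc : List Int × Int) (x : Int) : List Int × Int :=
  let stack := acc.1 ++ [x]
  if PySem.List.slice stack (some (-4)) none = [1, 2, 3, 1] then
    (PySem.List.slice stack none (some (-4)), acc.2 + 1)
  else (stack, acc.2)

def solution_alt (ingredient : List Int) : Int :=
  (ingredient.foldl bstep ([], 0)).2

-- ===== PRECONDITION & SPEC =====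
def Spec_solution (ingredient : List Int) (out : Int) : Prop := out = solution_alt ingredient
instance (ingredient : List Int) (out : Int) : Decidable (Spec_solution ingredient out) := by unfold Spec_solution; infer_instance

-- ===== CLAIM (what is proved, stated in full; the proofs are below) =====
def Claim_equal_solution : Prop := ∀ (ingredient : List Int), Dom_solution ingredient → Spec_solution ingredient (solution ingredient)

-- ===== LEMMAS AND PROOFS =====

-- B's fold started in stack st with count 0
def pvF (st xs : List Int) : List Int × Int := xs.foldl bstep (st, 0)

-- "no occurrence of [1,2,3,1] starts before position m"
def pvNoWin (s : List Int) (m : Nat) : Prop :=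
  ∀ q : Nat, q + 4 ≤ m →
    ¬(s[q]? = some 1 ∧ s[q+1]? = some 2 ∧ s[q+2]? = some 3 ∧ s[q+3]? = some 1)

lemma bstep_eq (st : List Int) (a x : Int) :
    bstep (st, a) x =
      if (st ++ [x]).drop (st.length + 1 - 4) = [1, 2, 3, 1]
      then ((st ++ [x]).take (st.length + 1 - 4), a + 1)
      else (st ++ [x], a) := by
  show (if PySem.List.slice (st ++ [x]) (some (-4)) none = [1, 2, 3, 1]
      then (PySem.List.slice (st ++ [x]) none (some (-4)), a + 1)
      else (st ++ [x], a)) = _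
  rw [PySem.List.slice_from_neg_ofNat _ 4 (by omega),
      PySem.List.slice_to_neg_ofNat _ 4 (by omega)]
  simp

lemma window_of_drop_take (s : List Int) (q : Nat)
    (h : (s.drop q).take 4 = [1, 2, 3, 1]) :
    s[q]? = some 1 ∧ s[q+1]? = some 2 ∧ s[q+2]? = some 3 ∧ s[q+3]? = some 1 := by
  have h0 := congrArg (fun t : List Int => t[0]?) h
  have h1 := congrArg (fun t : List Int => t[1]?) h
  have h2 := congrArg (fun t : List Int => t[2]?) h
  have h3 := congrArg (fun t : List Int => t[3]?) h
  simp [List.getElem?_take, List.getElem?_drop] at h0 h1 h2 h3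
  exact ⟨h0, h1, h2, h3⟩

lemma drop_take_of_window (s : List Int) (q : Nat) (hlen : q + 4 ≤ s.length)
    (h0 : s[q]? = some 1) (h1 : s[q+1]? = some 2) (h2 : s[q+2]? = some 3)
    (h3 : s[q+3]? = some 1) :
    (s.drop q).take 4 = [1, 2, 3, 1] := by
  apply List.ext_getElem?
  intro i
  match i with
  | 0 => simp [List.getElem?_take, List.getElem?_drop, h0]
  | 1 => simp [List.getElem?_take, List.getElem?_drop, h1]
  | 2 => simp [List.getElem?_take, List.getElem?_drop, h2]
  | 3 => simp [List.getElem?_take, List.getElem?_drop, h3]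
  | (n+4) => simp [List.getElem?_take]

lemma foldl_bstep_shift : ∀ (xs st : List Int) (a : Int),
    xs.foldl bstep (st, a) = ((xs.foldl bstep (st, 0)).1, a + (xs.foldl bstep (st, 0)).2) := by
  intro xs
  induction xs with
  | nil => intro st a; simp
  | cons x t ih =>
    intro st a
    have hx : ∀ b : Int, bstep (st, b) x = ((bstep (st, 0) x).1, b + (bstep (st, 0) x).2) := by
      intro b; rw [bstep_eq, bstep_eq]; split_ifs <;> simp
    simp only [List.foldl_cons]
    rw [hx a, hx 0]
    dsimp only
    simp only [zero_add]
    rw [ih _ (a + (bstep (st, 0) x).2), ih _ ((bstep (st, 0) x).2)]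
    refine Prod.ext rfl ?_
    dsimp only
    ring

lemma pvF_small : ∀ (xs st : List Int), st.length + xs.length < 4 → pvF st xs = (st ++ xs, 0) := by
  intro xs
  induction xs with
  | nil => intro st h; simp [pvF]
  | cons x t ih =>
    intro st h
    simp only [List.length_cons] at h
    unfold pvF
    rw [List.foldl_cons, bstep_eq]
    have hc : ¬((st ++ [x]).drop (st.length + 1 - 4) = [1, 2, 3, 1]) := by
      intro he
      have := congrArg List.length he
      simp at this
      omega
    rw [if_neg hc]
    have h2 := ih (st ++ [x]) (by simp; omega)
    unfold pvF at h2
    rw [h2]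
    simp

lemma pvF_step (s : List Int) (j : Nat) (hj : j < s.length) (hw : pvNoWin s (j + 1)) :
    pvF (s.take j) (s.drop j) = pvF (s.take (j + 1)) (s.drop (j + 1)) := by
  have hdrop : s.drop j = s[j] :: s.drop (j + 1) := List.drop_eq_getElem_cons hj
  have hts : s.take j ++ [s[j]] = s.take (j + 1) := by
    rw [List.take_succ]
    simp [List.getElem?_eq_getElem hj]
  unfold pvF
  rw [hdrop, List.foldl_cons, bstep_eq]
  have hc : ¬((s.take j ++ [s[j]]).drop ((s.take j).length + 1 - 4) = [1, 2, 3, 1]) := by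
    rw [hts]
    intro he
    have hlt : (s.take j).length = j := by simp; omega
    rw [hlt] at he
    by_cases h4 : j + 1 < 4
    · have := congrArg List.length he
      simp at this
      omega
    · -- j ≥ 3: the dropped window is (s.drop (j-3)).take 4, a window at j-3 < j+1
      rw [List.drop_take] at he
      have e1 : j + 1 - 4 = j - 3 := by omega
      have e2 : j + 1 - (j + 1 - 4) = 4 := by omega
      rw [e2, e1] at he
      exact hw (j - 3) (by omega) (window_of_drop_take s (j - 3) he)
  rw [if_neg hc, hts]

lemma pvF_advance (s : List Int) (k j : Nat) (hk : k ≤ j) (hj : j ≤ s.length)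
    (hw : pvNoWin s j) : pvF (s.take k) (s.drop k) = pvF (s.take j) (s.drop j) := by
  revert hj hw
  induction j, hk using Nat.le_induction with
  | base => intro _ _; rfl
  | succ j hkj ih =>
    intro hj hw
    rw [ih (by omega) (fun q hq => hw q (by omega)),
        pvF_step s j (by omega) (fun q hq => hw q (by omega))]

lemma erase4 : ∀ (xs : List Int) (j : Nat), j + 4 ≤ xs.length →
    ((((xs.eraseIdx j).eraseIdx j).eraseIdx j).eraseIdx j) = xs.take j ++ xs.drop (j + 4) := by
  intro xs j
  induction j generalizing xs with
  | zero =>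
    intro h
    match xs, h with
    | a :: b :: c :: d :: t, _ => simp [List.eraseIdx]
  | succ j ih =>
    intro h
    match xs, h with
    | a :: t, h =>
      simp only [List.eraseIdx_cons_succ]
      rw [ih t (by simp at h; omega)]
      have e : j + 1 + 4 = (j + 4) + 1 := by omega
      rw [e]
      simp [List.take_succ_cons, List.drop_succ_cons]

-- getElem? into the unchanged prefix of take j ing ++ v
lemma pre_getElem (ing v : List Int) (j i : Nat) (hj : j ≤ ing.length) (hi : i < j) :
    (ing.take j ++ v)[i]? = ing[i]? := by
  rw [List.getElem?_append, if_pos (by simp [List.length_take]; omega),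
      List.getElem?_take, if_pos hi]

-- a negative index cannot satisfy A's four-element slice test (the slice is too short)
lemma match_nonneg (ing : List Int) (idx : Int) (hge : -2 ≤ idx)
    (hn : 4 ≤ (ing.length : Int))
    (hs : PySem.List.slice ing (some idx) (some (idx + 4)) = [1, 2, 3, 1]) : 0 ≤ idx := by
  by_contra hneg
  push_neg at hneg
  have hl := congrArg List.length hs
  rw [PySem.List.length_slice] at hl
  simp only [PySem.List.clampIdx, List.length_cons, List.length_nil] at hl
  split_ifs at hl <;> omega

-- a successful four-element slice test implies four elements are available
lemma match_bound (ing : List Int) (idx : Int) (h0 : 0 ≤ idx)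
    (hs : PySem.List.slice ing (some idx) (some (idx + 4)) = [1, 2, 3, 1]) :
    idx + 4 ≤ (ing.length : Int) := by
  have hl := congrArg List.length hs
  rw [PySem.List.length_slice] at hl
  simp only [PySem.List.clampIdx, List.length_cons, List.length_nil] at hl
  split_ifs at hl <;> omega

lemma loop_eq (fuel : Nat) : ∀ (ing : List Int) (ans len idx : Int),
    (ing.length : Int) - idx < fuel →
    len = (ing.length : Int) → -2 ≤ idx → idx ≤ (ing.length : Int) →
    pvNoWin ing (idx + 3).toNat →
    solutionLoop fuel ing ans len idx
      = ans + (pvF (ing.take idx.toNat) (ing.drop idx.toNat)).2 := by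
  induction fuel with
  | zero =>
    intro ing ans len idx hf hlen hge hle hw
    exact absurd hf (by omega)
  | succ fuel ih =>
    intro ing ans len idx hf hlen hge hle hw
    by_cases hemp : ing = []
    · subst hemp
      simp [solutionLoop, pvF]
    · rw [solutionLoop, if_neg hemp]
      by_cases hguard : len < 4 ∨ (ing.length : Int) ≤ idx
      · rw [if_pos hguard]
        rcases hguard with hg | hg
        · -- fewer than 4 ingredients in total: B's fold never pops
          have hsm := pvF_small (ing.drop idx.toNat) (ing.take idx.toNat)
            (by simp [List.length_take, List.length_drop]; omega)
          rw [hsm]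
          simp
        · -- idx has reached the end: nothing left to fold
          rw [show idx.toNat = ing.length by omega, List.drop_length]
          simp [pvF]
      · rw [if_neg hguard]
        push_neg at hguard
        by_cases hmatch : idx + 3 ≤ (ing.length : Int) ∧
            PySem.List.slice ing (some idx) (some (idx + 4)) = [1, 2, 3, 1]
        · rw [if_pos hmatch]
          have hidx : 0 ≤ idx := match_nonneg ing idx hge (by omega) hmatch.2
          obtain ⟨j, hji⟩ : ∃ j : Nat, idx = (j : Int) := ⟨idx.toNat, (Int.toNat_of_nonneg hidx).symm⟩
          subst hji
          have hjn : j + 4 ≤ ing.length := by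
            have hb := match_bound ing _ (by omega) hmatch.2
            omega
          -- the slice test in drop/take form and its four components
          have hsl : (ing.drop j).take 4 = [1, 2, 3, 1] := by
            have hs := hmatch.2
            rw [show ((j : Int) + 4) = ((j : Int) + ((4 : Nat) : Int)) by norm_num] at hs
            rwa [PySem.List.slice_natCast_add] at hs
          obtain ⟨c0, c1, c2, c3⟩ := window_of_drop_take ing j hsl
          have hw' : pvNoWin ing (j + 3) := by
            rw [show ((j : Int) + 3).toNat = j + 3 by omega] at hw
            exact hw
          -- reduce the four pops
          have hl1 : (ing.eraseIdx j).length = ing.length - 1 := by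
            rw [List.length_eraseIdx_of_lt (by omega)]
          have hl2 : ((ing.eraseIdx j).eraseIdx j).length = ing.length - 2 := by
            rw [List.length_eraseIdx_of_lt (by omega), hl1]
            omega
          have hl3 : (((ing.eraseIdx j).eraseIdx j).eraseIdx j).length = ing.length - 3 := by
            rw [List.length_eraseIdx_of_lt (by omega), hl2]
            omega
          rw [PySem.List.pop?_natCast ing j (by omega)]
          dsimp only
          rw [PySem.List.pop?_natCast (ing.eraseIdx j) j (by omega)]
          dsimp only
          rw [PySem.List.pop?_natCast ((ing.eraseIdx j).eraseIdx j) j (by omega)]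
          dsimp only
          rw [PySem.List.pop?_natCast (((ing.eraseIdx j).eraseIdx j).eraseIdx j) j (by omega)]
          dsimp only
          rw [erase4 ing j hjn]
          have hlen4 : (ing.take j ++ ing.drop (j + 4)).length = ing.length - 4 := by
            simp [List.length_take, List.length_drop]
            omega
          -- apply the induction hypothesis to the shortened list
          have hwr : pvNoWin (ing.take j ++ ing.drop (j + 4)) (((j : Int) - 2 + 3).toNat) := by
            intro q hq hwin
            obtain ⟨w0, w1, w2, w3⟩ := hwin
            have hq' : q + 4 ≤ j + 1 := by omega
            by_cases hq3 : q + 3 < j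
            · rw [pre_getElem ing _ j q (by omega) (by omega)] at w0
              rw [pre_getElem ing _ j (q+1) (by omega) (by omega)] at w1
              rw [pre_getElem ing _ j (q+2) (by omega) (by omega)] at w2
              rw [pre_getElem ing _ j (q+3) (by omega) (by omega)] at w3
              exact hw' q (by omega) ⟨w0, w1, w2, w3⟩
            · -- q + 3 = j: the fourth element is ing[j] = 1, a window of the original list
              have hqj : q + 3 = j := by omega
              rw [pre_getElem ing _ j q (by omega) (by omega)] at w0
              rw [pre_getElem ing _ j (q+1) (by omega) (by omega)] at w1
              rw [pre_getElem ing _ j (q+2) (by omega) (by omega)] at w2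
              refine hw' q (by omega) ⟨w0, w1, w2, ?_⟩
              rw [hqj]
              exact c0
          rw [ih (ing.take j ++ ing.drop (j + 4)) (ans + 1) _ ((j : Int) - 2)
                (by rw [hlen4]; push_cast; omega) rfl (by omega)
                (by rw [hlen4]; push_cast; omega) hwr]
          -- now compute B's fold across the removed pattern
          have hstep1 : pvF (ing.take j) (ing.drop j) = pvF (ing.take (j+3)) (ing.drop (j+3)) :=
            pvF_advance ing j (j+3) (by omega) (by omega) hw'
          have hg3 : ing[j+3]'(by omega) = 1 := by
            have := c3
            rw [List.getElem?_eq_getElem (show j+3 < ing.length by omega)] at this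
            exact Option.some.inj this
          have hdrop3 : ing.drop (j+3) = 1 :: ing.drop (j+4) := by
            rw [List.drop_eq_getElem_cons (show j+3 < ing.length by omega), hg3]
          have htk4 : ing.take (j+3) ++ [1] = ing.take (j+4) := by
            conv_rhs => rw [show j+4 = (j+3)+1 by omega, List.take_add]
            rw [hdrop3]
            simp
          have hlen3 : (ing.take (j+3)).length = j + 3 := by simp; omega
          have hpop : bstep (ing.take (j+3), (0:Int)) 1 = (ing.take j, 1) := by
            rw [bstep_eq, hlen3, htk4]
            have hcond : (ing.take (j+4)).drop (j + 3 + 1 - 4) = [1, 2, 3, 1] := by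
              rw [show j + 3 + 1 - 4 = j by omega, List.drop_take,
                  show j + 4 - j = 4 by omega]
              exact hsl
            rw [if_pos hcond, show j + 3 + 1 - 4 = j by omega, List.take_take,
                show min j (j+4) = j by omega]
            norm_num
          have hstep2 : pvF (ing.take (j+3)) (ing.drop (j+3))
              = ((pvF (ing.take j) (ing.drop (j+4))).1,
                 1 + (pvF (ing.take j) (ing.drop (j+4))).2) := by
            rw [hdrop3]
            unfold pvF
            rw [List.foldl_cons, hpop]
            exact foldl_bstep_shift (ing.drop (j+4)) (ing.take j) 1
          -- and realign B's fold on the shortened list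
          have hul : (ing.take j).length = j := by simp; omega
          have htl : (ing.take j ++ ing.drop (j + 4)).take j = ing.take j :=
            List.take_left' hul
          have hdl : (ing.take j ++ ing.drop (j + 4)).drop j = ing.drop (j + 4) :=
            List.drop_left' hul
          have hwr2 : pvNoWin (ing.take j ++ ing.drop (j + 4)) j := by
            intro q hq hwin
            obtain ⟨w0, w1, w2, w3⟩ := hwin
            rw [pre_getElem ing _ j q (by omega) (by omega)] at w0
            rw [pre_getElem ing _ j (q+1) (by omega) (by omega)] at w1
            rw [pre_getElem ing _ j (q+2) (by omega) (by omega)] at w2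
            rw [pre_getElem ing _ j (q+3) (by omega) (by omega)] at w3
            exact hw' q (by omega) ⟨w0, w1, w2, w3⟩
          have hstep3 : pvF ((ing.take j ++ ing.drop (j + 4)).take ((j : Int) - 2).toNat)
                ((ing.take j ++ ing.drop (j + 4)).drop ((j : Int) - 2).toNat)
              = pvF (ing.take j) (ing.drop (j+4)) := by
            rw [pvF_advance (ing.take j ++ ing.drop (j + 4)) ((j : Int) - 2).toNat j
                  (by omega) (by rw [hlen4]; omega) hwr2, htl, hdl]
          rw [show ((j : Int)).toNat = j by omega, hstep1, hstep2, hstep3]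
          ring
        · rw [if_neg hmatch]
          have hwnew : pvNoWin ing ((idx + 1) + 3).toNat := by
            by_cases hneg : idx < 0
            · intro q hq _
              omega
            · intro q hq hwin
              have hj : idx = (idx.toNat : Int) := (Int.toNat_of_nonneg (by omega)).symm
              by_cases hq3 : q + 4 ≤ (idx + 3).toNat
              · exact hw q hq3 hwin
              · -- q is exactly idx: this would be a match A's test just rejected
                obtain ⟨w0, w1, w2, w3⟩ := hwin
                have hjq : idx = (q : Int) := by omega
                have hlt : q + 3 < ing.length := (List.getElem?_eq_some_iff.mp w3).1
                have hsl : (ing.drop q).take 4 = [1, 2, 3, 1] :=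
                  drop_take_of_window ing q (by omega) w0 w1 w2 w3
                apply hmatch
                constructor
                · omega
                · rw [hjq, show ((q : Int) + 4) = ((q : Int) + ((4 : Nat) : Int)) by norm_num,
                     PySem.List.slice_natCast_add]
                  exact hsl
          rw [ih ing ans len (idx + 1) (by omega) hlen (by omega) (by omega) hwnew]
          by_cases hneg : idx < 0
          · rw [show (idx + 1).toNat = idx.toNat by omega]
          · have hstep := pvF_step ing idx.toNat (by omega)
              (by intro q hq hwin; exact hw q (by omega) hwin)
            rw [show (idx + 1).toNat = idx.toNat + 1 by omega, ← hstep]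

-- ===== VERDICT (by name: the statement is the Claim_ definition above) =====
theorem solution_spec : Claim_equal_solution := by
  intro ingredient _
  unfold Spec_solution solution solution_alt
  have h := loop_eq (ingredient.length + 1) ingredient 0 (ingredient.length : Int) 0
    (by push_cast; omega) rfl (by omega) (by omega) (by intro q hq _; omega)
  simpa [pvF] using h
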